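-- pv_equiv track=rewrite | github.com/Firre00/piu-converter | converter.py | addHoldsMeasure
-- ===== SOURCE A (Python) =====
-- def addHoldsMeasure(measureIndex, notes):
-- 	ishold = [0, 0, 0, 0, 0, 0, 0, 0, 0, 0]
-- 	for note in range(len(notes[measureIndex - 1][-1])):
-- 		curNote = notes[measureIndex - 1][-1][note]
-- 		if curNote == "M":
-- 			ishold[note] = 1
--
-- 		if curNote == "H":
-- 			ishold[note] = 1
--
-- 	for beat in range(len(notes[measureIndex])):
-- 			for note in range(len(notes[measureIndex][beat])):
-- 						curNote = notes[measureIndex][beat][note]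
-- 						if ishold[note] == 1 and curNote != "W":
-- 							tempnotes = list(notes[measureIndex][beat])
-- 							tempnotes[note] = "H"
-- 							notes[measureIndex][beat] = "".join(tempnotes)
--
-- 						if curNote == "M":
-- 							ishold[note] = 1
--
-- 						if curNote == "W":
-- 							ishold[note] = 0
-- 	return notes
-- ===== SOURCE B (Python) =====
-- def addHoldsMeasure(measureIndex, notes):
--     # Column-major rewrite: walk each of the 10 note columns down the measure,
--     # threading that column's hold flag.  Return value only: A mutates the inner
--     # beat list of notes[measureIndex] in place, B replaces it wholesale.
--     prevBeat = notes[measureIndex - 1][-1]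
--     measure = list(notes[measureIndex])
--     for p in range(10):
--         hold = p < len(prevBeat) and prevBeat[p] in ("M", "H")
--         for i in range(len(measure)):
--             beat = measure[i]
--             if p < len(beat):
--                 c = beat[p]
--                 if hold and c != "W":
--                     measure[i] = beat[:p] + "H" + beat[p + 1:]
--                 if c == "M":
--                     hold = True
--                 elif c == "W":
--                     hold = False
--     notes[measureIndex] = measure
--     return notes
-- ===== Notes on version B (the rewrite author's own statement) =====
-- stated objective: alternative
-- what changed: B traverses the measure column-major: for each of the 10 note columns it seeds the hold flag from the previous measure's last beat and walks the beats threading that single flag, instead of A's beat-major sweep that threads a 10-slot hold array; B also rebuilds the measure as a fresh list (return value only) where A mutates the inner beat list in place.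
import Mathlib
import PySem

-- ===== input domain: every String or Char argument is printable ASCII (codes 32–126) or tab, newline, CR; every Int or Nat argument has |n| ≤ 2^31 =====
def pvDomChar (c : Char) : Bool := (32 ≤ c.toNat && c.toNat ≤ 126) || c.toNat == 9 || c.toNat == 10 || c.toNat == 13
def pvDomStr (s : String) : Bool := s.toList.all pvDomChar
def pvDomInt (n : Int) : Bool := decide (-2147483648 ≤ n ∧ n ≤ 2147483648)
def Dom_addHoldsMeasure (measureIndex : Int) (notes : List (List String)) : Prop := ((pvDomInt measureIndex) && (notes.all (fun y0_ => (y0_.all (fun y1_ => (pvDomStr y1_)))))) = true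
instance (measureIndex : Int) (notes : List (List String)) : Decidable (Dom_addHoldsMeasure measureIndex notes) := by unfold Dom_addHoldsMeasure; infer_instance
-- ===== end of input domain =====

-- B propagates holds column-major (one flag per note column walked down the measure)
-- instead of A's beat-major sweep with a 10-slot hold array; equivalence is about the
-- RETURN value only: Python A mutates the inner list notes[measureIndex] in place,
-- Python B rebinds notes[measureIndex] to a fresh list.

-- ===== PORT A =====
-- body of the first loop: seed the 10-slot hold array from the prior beat
def initStep (pb : List Char) (ish : List Int) (note : Nat) : List Int :=
  let curNote := pb.getD note ' '
  let ish := if curNote = 'M' then ish.set note 1 else ish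
  if curNote = 'H' then ish.set note 1 else ish

def isholdInit (pb : List Char) : List Int :=
  (List.range pb.length).foldl (initStep pb) [0, 0, 0, 0, 0, 0, 0, 0, 0, 0]

-- body of the inner `for note in range(...)` loop
def beatStepA : List Char × List Int → Nat → List Char × List Int
  | (s0, ish0), note =>
    let curNote := s0.getD note ' '
    let s := if ish0.getD note 0 = 1 ∧ curNote ≠ 'W' then s0.set note 'H' else s0
    let ish := if curNote = 'M' then ish0.set note 1 else ish0
    let ish := if curNote = 'W' then ish.set note 0 else ish
    (s, ish)

-- body of the outer `for beat in range(...)` loop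
def measStepA : List String × List Int → Nat → List String × List Int
  | (m, ish), beat =>
    let s0 := (m.getD beat "").toList
    let r := (List.range s0.length).foldl beatStepA (s0, ish)
    (m.set beat (String.ofList r.1), r.2)

def addHoldsMeasure (measureIndex : Int) (notes : List (List String)) : List (List String) :=
  match PySem.List.pyGet? notes (measureIndex - 1) with
  | none => notes
  | some prevM =>
    match PySem.List.pyGet? prevM (-1) with
    | none => notes
    | some prevBeat =>
      let ishold := isholdInit prevBeat.toList
      match PySem.List.pyGet? notes measureIndex with
      | none => notes
      | some curM =>
        PySem.List.pySetD notes measureIndex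
          ((List.range curM.length).foldl measStepA (curM, ishold)).1

-- ===== PORT B =====
-- seed hold flag for column p, from the previous measure's last beat
def seedHold (pb : List Char) (p : Nat) : Bool :=
  decide (p < pb.length) && (pb.getD p ' ' == 'M' || pb.getD p ' ' == 'H')

-- body of B's inner `for i in range(len(measure))` loop (column p fixed)
def colStepB (p : Nat) : List String × Bool → Nat → List String × Bool
  | (m0, hold), i =>
    let beat := (m0.getD i "").toList
    if p < beat.length then
      let c := beat.getD p ' '
      let m := if hold && !(c == 'W') then
          m0.set i (String.ofList (beat.take p ++ 'H' :: beat.drop (p + 1)))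
        else m0
      (m, if c == 'M' then true else if c == 'W' then false else hold)
    else (m0, hold)

-- one full pass of B's inner loop for column p
def colPassB (pb : List Char) (measure : List String) (p : Nat) : List String :=
  ((List.range measure.length).foldl (colStepB p) (measure, seedHold pb p)).1

def addHoldsMeasure_alt (measureIndex : Int) (notes : List (List String)) : List (List String) :=
  match PySem.List.pyGet? notes (measureIndex - 1) with
  | none => notes
  | some prevM =>
    match PySem.List.pyGet? prevM (-1) with
    | none => notes
    | some prevBeat =>
      match PySem.List.pyGet? notes measureIndex with
      | none => notes
      | some measure0 =>
        PySem.List.pySetD notes measureIndex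
          ((List.range 10).foldl (colPassB prevBeat.toList) measure0)

-- ===== PRECONDITION & SPEC =====
-- Pre_ excludes exactly the inputs where Python A raises IndexError: an out-of-range
-- measure index (for measureIndex-1 or measureIndex), an empty previous measure
-- ([-1] → IndexError), an 'M'/'H' at column ≥ 10 of the previous measure's last
-- beat, or a beat longer than 10 in the current measure (each indexes the 10-slot
-- hold array out of range).
def Pre_addHoldsMeasure (measureIndex : Int) (notes : List (List String)) : Prop :=
  PySem.Raise.InRange notes.length (measureIndex - 1) ∧
  PySem.Raise.InRange notes.length measureIndex ∧
  (PySem.List.pyGet? notes (measureIndex - 1)).getD [] ≠ [] ∧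
  (((((PySem.List.pyGet? notes (measureIndex - 1)).getD []).getLast?.getD "").toList.drop 10).all
      (fun c => !(c == 'M' || c == 'H')) = true) ∧
  (((PySem.List.pyGet? notes measureIndex).getD []).all
      (fun s => decide (s.toList.length ≤ 10)) = true)

instance (measureIndex : Int) (notes : List (List String)) : Decidable (Pre_addHoldsMeasure measureIndex notes) := by
  unfold Pre_addHoldsMeasure; infer_instance

def pvWitness_addHoldsMeasure : Int × List (List String) := (1, [["M0"], ["00", "W0"]])

def Spec_addHoldsMeasure (measureIndex : Int) (notes : List (List String)) (out : List (List String)) : Prop := out = addHoldsMeasure_alt measureIndex notes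
instance (measureIndex : Int) (notes : List (List String)) (out : List (List String)) : Decidable (Spec_addHoldsMeasure measureIndex notes out) := by unfold Spec_addHoldsMeasure; infer_instance

-- ===== CLAIM (what is proved, stated in full; the proofs are below) =====
def Claim_equal_addHoldsMeasure : Prop := ∀ (measureIndex : Int) (notes : List (List String)), Dom_addHoldsMeasure measureIndex notes → Pre_addHoldsMeasure measureIndex notes → Spec_addHoldsMeasure measureIndex notes (addHoldsMeasure measureIndex notes)

-- ===== LEMMAS AND PROOFS =====

-- common per-cell semantics: output char and next hold state of one grid cell
def b2i (h : Bool) : Int := if h then 1 else 0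
def cellC (h : Bool) (c : Char) : Char := if h && !(c == 'W') then 'H' else c
def nxtC (h : Bool) (c : Char) : Bool := if c == 'M' then true else if c == 'W' then false else h
def nxtRow (H : Nat → Bool) (r : List Char) : Nat → Bool :=
  fun p => if p < r.length then nxtC (H p) (r.getD p ' ') else H p

-- row-major reference semantics of the whole transformation
def spec (H : Nat → Bool) : List (List Char) → List (List Char)
  | [] => []
  | r :: rs => (r.mapIdx fun p c => cellC (H p) c) :: spec (nxtRow H r) rs

-- column-major: one column pass at char-list level
def colSpecL (p : Nat) (h : Bool) : List (List Char) → List (List Char)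
  | [] => []
  | r :: rs =>
    (if p < r.length then r.set p (cellC h (r.getD p ' ')) else r) ::
      colSpecL p (if p < r.length then nxtC h (r.getD p ' ') else h) rs

-- ---- small list helpers ----

theorem pvDropLt {α : Type} {l : List α} {k : Nat} {c : α} {rest : List α}
    (h : l.drop k = c :: rest) : k < l.length := by
  by_contra hc
  rw [List.drop_eq_nil_iff.mpr (by omega)] at h
  cases h

theorem pvDropGet {α : Type} {l : List α} {k : Nat} {c : α} {rest : List α}
    (h : l.drop k = c :: rest) : l[k]? = some c := by
  have h0 : (l.drop k)[0]? = l[k + 0]? := List.getElem?_drop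
  rw [h] at h0
  simpa using h0.symm

theorem pvDropGetD {α : Type} {l : List α} {k : Nat} {c : α} {rest : List α}
    (h : l.drop k = c :: rest) (d : α) : l.getD k d = c := by
  rw [List.getD_eq_getElem?_getD, pvDropGet h]; rfl

theorem pvDropSucc {α : Type} {l : List α} {k : Nat} {c : α} {rest : List α}
    (h : l.drop k = c :: rest) : l.drop (k + 1) = rest := by
  rw [← List.tail_drop, h]
  rfl

theorem pvSetDropHigh {α : Type} (l : List α) (k j : Nat) (v : α) (h : k < j) :
    (l.set k v).drop j = l.drop j := by
  apply List.ext_getElem?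
  intro i
  rw [List.getElem?_drop, List.getElem?_drop, List.getElem?_set_ne (by omega)]

theorem pvTakeSet {α : Type} (l : List α) (k j : Nat) (v : α) (h : j ≤ k) :
    (l.set k v).take j = l.take j := by
  induction l generalizing k j with
  | nil => simp
  | cons a l ih =>
    cases k with
    | zero =>
      cases j with
      | zero => simp
      | succ j => omega
    | succ k =>
      cases j with
      | zero => simp
      | succ j =>
        rw [List.set_cons_succ, List.take_succ_cons, List.take_succ_cons,
          ih k j (by omega)]

theorem pvSetTake {α : Type} (l : List α) (k : Nat) (v : α) (h : k < l.length) :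
    (l.set k v).take (k + 1) = l.take k ++ [v] := by
  rw [List.take_add_one, pvTakeSet l k k v le_rfl, List.getElem?_set_self h]
  rfl

theorem pvGetDSetSelf {α : Type} (l : List α) (k : Nat) (v d : α) (h : k < l.length) :
    (l.set k v).getD k d = v := by
  simp [List.getD_eq_getElem?_getD, List.getElem?_set_self h]

theorem pvGetDSetNe {α : Type} (l : List α) (k p : Nat) (v d : α) (h : k ≠ p) :
    (l.set k v).getD p d = l.getD p d := by
  simp [List.getD_eq_getElem?_getD, List.getElem?_set_ne h]

theorem pvGetDEq {α : Type} (l : List α) (k : Nat) (d : α) (h : k < l.length) :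
    l.getD k d = l[k] := by
  simp [List.getD_eq_getElem?_getD, List.getElem?_eq_getElem h]

theorem pvSetSelf {α : Type} (l : List α) (k : Nat) (d : α) (h : k < l.length) :
    l.set k (l.getD k d) = l := by
  rw [pvGetDEq l k d h]; simp

theorem pvMapIdxGetD {α β : Type} (f : Nat → α → β) (l : List α) (n : Nat) (d : β)
    (h : n < l.length) : (l.mapIdx f).getD n d = f n l[n] := by
  have hl : n < (l.mapIdx f).length := by simp [List.length_mapIdx, h]
  simp [List.getD_eq_getElem?_getD, List.getElem?_eq_getElem hl, List.getElem_mapIdx]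

theorem pvOfToMap (m : List String) : (m.map String.toList).map String.ofList = m := by
  rw [List.map_map]
  have : (String.ofList ∘ String.toList) = id := funext fun s => by simp
  rw [this, List.map_id]

theorem pvToOfMap (g : List (List Char)) : ((g.map String.ofList).map String.toList) = g := by
  rw [List.map_map]
  have : (String.toList ∘ String.ofList) = id := funext fun l => by simp
  rw [this, List.map_id]

-- ---- A-side ----

theorem isholdInit_aux (pb : List Char)
    (_hpb : ∀ p, 10 ≤ p → p < pb.length → ¬(pb.getD p ' ' = 'M' ∨ pb.getD p ' ' = 'H')) :
    ∀ n, n ≤ pb.length →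
      ((List.range n).foldl (initStep pb) [0, 0, 0, 0, 0, 0, 0, 0, 0, 0]).length = 10 ∧
      ∀ p, p < 10 →
        ((List.range n).foldl (initStep pb) [0, 0, 0, 0, 0, 0, 0, 0, 0, 0]).getD p 0
          = b2i (decide (p < n) && (pb.getD p ' ' == 'M' || pb.getD p ' ' == 'H')) := by
  intro n
  induction n with
  | zero =>
    intro _
    refine ⟨rfl, ?_⟩
    intro p hp
    simp only [Nat.not_lt_zero, decide_false, Bool.false_and, b2i, if_neg Bool.false_ne_true]
    interval_cases p <;> rfl
  | succ n ih =>
    intro hn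
    obtain ⟨hlen, hget⟩ := ih (by omega)
    rw [List.range_succ, List.foldl_append, List.foldl_cons, List.foldl_nil]
    have hstep : ∀ ish : List Int, initStep pb ish n =
        if pb.getD n ' ' = 'H' then
          (if pb.getD n ' ' = 'M' then ish.set n 1 else ish).set n 1
        else if pb.getD n ' ' = 'M' then ish.set n 1 else ish := fun ish => rfl
    rw [hstep]
    constructor
    · split_ifs <;> simp [List.length_set, hlen]
    · intro p hp
      by_cases hM : pb.getD n ' ' = 'M'
      · have hH : ¬ pb.getD n ' ' = 'H' := by rw [hM]; decide
        rw [if_neg hH, if_pos hM]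
        by_cases hpn : p = n
        · subst hpn
          rw [pvGetDSetSelf _ _ _ _ (by omega)]
          have hMb : (pb.getD p ' ' == 'M') = true := by rw [hM]; rfl
          have hd : decide (p < p + 1) = true := by simp
          rw [hd, hMb]
          rfl
        · rw [pvGetDSetNe _ _ _ _ _ (fun e => hpn e.symm), hget p hp]
          have : decide (p < n + 1) = decide (p < n) := by
            by_cases h' : p < n <;> simp [h'] <;> omega
          rw [this]
      · rw [if_neg hM]
        by_cases hH : pb.getD n ' ' = 'H'
        · rw [if_pos hH]
          by_cases hpn : p = n
          · subst hpn
            rw [pvGetDSetSelf _ _ _ _ (by omega)]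
            have hHb : (pb.getD p ' ' == 'H') = true := by rw [hH]; rfl
            have hMb : (pb.getD p ' ' == 'M') = false := beq_eq_false_iff_ne.mpr hM
            have hd : decide (p < p + 1) = true := by simp
            rw [hd, hMb, hHb]
            rfl
          · rw [pvGetDSetNe _ _ _ _ _ (fun e => hpn e.symm), hget p hp]
            have : decide (p < n + 1) = decide (p < n) := by
              by_cases h' : p < n <;> simp [h'] <;> omega
            rw [this]
        · rw [if_neg hH, hget p hp]
          by_cases hpn : p = n
          · subst hpn
            have hMb : (pb.getD p ' ' == 'M') = false := beq_eq_false_iff_ne.mpr hM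
            have hHb : (pb.getD p ' ' == 'H') = false := beq_eq_false_iff_ne.mpr hH
            have hd : decide (p < p + 1) = true := by simp
            have hd0 : decide (p < p) = false := by simp
            rw [hd, hd0, hMb, hHb]
            rfl
          · have : decide (p < n + 1) = decide (p < n) := by
              by_cases h' : p < n <;> simp [h'] <;> omega
            rw [this]

theorem beatLoopA_aux :
    ∀ (rest : List Char) (k : Nat) (s : List Char) (ish : List Int) (H : Nat → Bool),
      s.length ≤ 10 → s.drop k = rest → ish.length = 10 →
      (∀ p, k ≤ p → p < 10 → ish.getD p 0 = b2i (H p)) →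
      ((List.range' k rest.length).foldl beatStepA (s, ish)).1
          = s.take k ++ rest.mapIdx (fun j c => cellC (H (k + j)) c) ∧
      ((List.range' k rest.length).foldl beatStepA (s, ish)).2.length = 10 ∧
      ∀ p, p < 10 →
        ((List.range' k rest.length).foldl beatStepA (s, ish)).2.getD p 0
          = if k ≤ p ∧ p < s.length then b2i (nxtC (H p) (s.getD p ' ')) else ish.getD p 0 := by
  intro rest
  induction rest with
  | nil =>
    intro k s ish H hlen hdrop hishlen hrel
    have hsk : s.length ≤ k := List.drop_eq_nil_iff.mp hdrop
    rw [show List.range' k ([] : List Char).length = ([] : List Nat) from rfl, List.foldl_nil]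
    refine ⟨?_, hishlen, ?_⟩
    · simp [List.take_of_length_le hsk]
    · intro p hp
      rw [if_neg (by omega)]
  | cons c rest' ih =>
    intro k s ish H hlen hdrop hishlen hrel
    have hk : k < s.length := pvDropLt hdrop
    have hck : s.getD k ' ' = c := pvDropGetD hdrop ' '
    have hk10 : k < 10 := lt_of_lt_of_le hk hlen
    have hrest : s.drop (k + 1) = rest' := pvDropSucc hdrop
    have hishk : ish.getD k 0 = b2i (H k) := hrel k le_rfl hk10
    have hs1 : (if ish.getD k 0 = 1 ∧ s.getD k ' ' ≠ 'W' then s.set k 'H' else s)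
        = s.set k (cellC (H k) c) := by
      rw [hck, hishk]
      cases hH : H k
      · rw [if_neg (by simp [b2i])]
        have : cellC false c = c := by simp [cellC]
        rw [this, ← hck]
        exact (pvSetSelf s k ' ' hk).symm
      · by_cases hW : c = 'W'
        · subst hW
          rw [if_neg (by simp)]
          have : cellC true 'W' = 'W' := by decide
          rw [this, ← hck]
          exact (pvSetSelf s k ' ' hk).symm
        · rw [if_pos ⟨by simp [b2i], hW⟩]
          have : cellC true c = 'H' := by simp [cellC, hW]
          rw [this]
    have hs2 : (if s.getD k ' ' = 'W' then
          (if s.getD k ' ' = 'M' then ish.set k 1 else ish).set k 0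
        else (if s.getD k ' ' = 'M' then ish.set k 1 else ish))
        = ish.set k (b2i (nxtC (H k) c)) := by
      rw [hck]
      by_cases hM : c = 'M'
      · subst hM
        rw [if_neg (by decide), if_pos rfl]
        simp [nxtC, b2i]
      · by_cases hW : c = 'W'
        · subst hW
          rw [if_pos rfl, if_neg (by decide)]
          simp [nxtC, b2i]
        · rw [if_neg hW, if_neg hM]
          have : nxtC (H k) c = H k := by simp [nxtC, hM, hW]
          rw [this, ← hishk]
          exact (pvSetSelf ish k 0 (by omega)).symm
    have hstep : beatStepA (s, ish) k
        = (s.set k (cellC (H k) c), ish.set k (b2i (nxtC (H k) c))) := by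
      simp only [beatStepA]
      rw [hs1, hs2]
    rw [show (c :: rest').length = rest'.length + 1 from rfl, List.range'_succ,
      List.foldl_cons, hstep]
    obtain ⟨ih1, ih2, ih3⟩ := ih (k + 1) (s.set k (cellC (H k) c))
        (ish.set k (b2i (nxtC (H k) c))) H
        (by rw [List.length_set]; exact hlen)
        (by rw [pvSetDropHigh _ _ _ _ (by omega)]; exact hrest)
        (by rw [List.length_set]; exact hishlen)
        (fun p hp1 hp2 => by
          rw [pvGetDSetNe _ _ _ _ _ (by omega)]
          exact hrel p (by omega) hp2)
    refine ⟨?_, ih2, ?_⟩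
    · rw [ih1, pvSetTake _ _ _ hk, List.mapIdx_cons]
      have hf : (fun (i : Nat) (c' : Char) => cellC (H (k + (i + 1))) c')
          = fun (i : Nat) (c' : Char) => cellC (H (k + 1 + i)) c' := by
        funext i c'
        have : k + (i + 1) = k + 1 + i := by omega
        rw [this]
      simp only [Nat.add_zero, hf, List.append_assoc, List.singleton_append]
    · intro p hp
      rw [ih3 p hp]
      by_cases hpk : p = k
      · subst hpk
        rw [if_neg (by omega), pvGetDSetSelf _ _ _ _ (by omega), if_pos ⟨le_rfl, hk⟩, hck]
      · rw [List.length_set, pvGetDSetNe _ _ _ _ _ (fun e => hpk e.symm),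
          pvGetDSetNe _ _ _ _ _ (fun e => hpk e.symm)]
        by_cases hple : k ≤ p
        · have hk1 : k + 1 ≤ p := by omega
          by_cases hps : p < s.length <;> simp [hk1, hple, hps]
        · rw [if_neg (by omega), if_neg (by omega)]

theorem measLoopA_aux :
    ∀ (rest : List String) (k : Nat) (m : List String) (ish : List Int) (H : Nat → Bool),
      m.drop k = rest → (∀ s ∈ rest, s.toList.length ≤ 10) → ish.length = 10 →
      (∀ p, p < 10 → ish.getD p 0 = b2i (H p)) →
      ((List.range' k rest.length).foldl measStepA (m, ish)).1
        = m.take k ++ (spec H (rest.map String.toList)).map String.ofList := by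
  intro rest
  induction rest with
  | nil =>
    intro k m ish H hdrop _ _ _
    have hmk : m.length ≤ k := List.drop_eq_nil_iff.mp hdrop
    simp [spec, List.take_of_length_le hmk]
  | cons s rest' ih =>
    intro k m ish H hdrop hvals hishlen hrel
    have hk : k < m.length := pvDropLt hdrop
    have hmk : m.getD k "" = s := pvDropGetD hdrop ""
    have hrest : m.drop (k + 1) = rest' := pvDropSucc hdrop
    have hs10 : s.toList.length ≤ 10 := hvals s List.mem_cons_self
    obtain ⟨hb1, hb2, hb3⟩ := beatLoopA_aux s.toList 0 s.toList ish H hs10 (by simp) hishlen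
      (fun p _ hp => hrel p hp)
    have hrow : ((List.range' 0 s.toList.length).foldl beatStepA (s.toList, ish)).1
        = s.toList.mapIdx (fun j c => cellC (H j) c) := by
      rw [hb1]
      simp
    have hish'rel : ∀ p, p < 10 →
        ((List.range' 0 s.toList.length).foldl beatStepA (s.toList, ish)).2.getD p 0
          = b2i (nxtRow H s.toList p) := by
      intro p hp
      rw [hb3 p hp]
      unfold nxtRow
      by_cases hps : p < s.toList.length
      · rw [if_pos ⟨Nat.zero_le _, hps⟩, if_pos hps]
      · rw [if_neg (by omega), if_neg hps]
        exact hrel p hp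
    rw [show (s :: rest').length = rest'.length + 1 from rfl, List.range'_succ, List.foldl_cons]
    have hstep : measStepA (m, ish) k
        = (m.set k (String.ofList (s.toList.mapIdx (fun j c => cellC (H j) c))),
           ((List.range' 0 s.toList.length).foldl beatStepA (s.toList, ish)).2) := by
      simp only [measStepA, hmk, List.range_eq_range']
      rw [hrow]
    rw [hstep]
    rw [ih (k + 1) _ _ (nxtRow H s.toList)
      (by rw [pvSetDropHigh _ _ _ _ (by omega)]; exact hrest)
      (fun t ht => hvals t (List.mem_cons_of_mem _ ht))
      hb2 hish'rel]
    rw [pvSetTake _ _ _ hk]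
    simp [spec, List.append_assoc]

-- ---- B-side ----

theorem colPass_aux :
    ∀ (rest : List String) (k : Nat) (m : List String) (h : Bool) (p : Nat),
      m.drop k = rest →
      ((List.range' k rest.length).foldl (colStepB p) (m, h)).1
        = m.take k ++ (colSpecL p h (rest.map String.toList)).map String.ofList := by
  intro rest
  induction rest with
  | nil =>
    intro k m h p hdrop
    have hmk : m.length ≤ k := List.drop_eq_nil_iff.mp hdrop
    simp [colSpecL, List.take_of_length_le hmk]
  | cons s rest' ih =>
    intro k m h p hdrop
    have hk : k < m.length := pvDropLt hdrop
    have hmk : m.getD k "" = s := pvDropGetD hdrop ""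
    have hmg : m[k]? = some s := pvDropGet hdrop
    have hrest : m.drop (k + 1) = rest' := pvDropSucc hdrop
    have hof : String.ofList s.toList = s := by simp
    rw [show (s :: rest').length = rest'.length + 1 from rfl, List.range'_succ, List.foldl_cons]
    by_cases hp : p < s.toList.length
    · have hcol : colSpecL p h (s.toList :: rest'.map String.toList)
          = (s.toList.set p (cellC h (s.toList.getD p ' ')))
            :: colSpecL p (nxtC h (s.toList.getD p ' ')) (rest'.map String.toList) := by
        simp only [colSpecL]
        rw [if_pos hp, if_pos hp]
      have hstep : colStepB p (m, h) k
          = (m.set k (String.ofList (s.toList.set p (cellC h (s.toList.getD p ' ')))),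
             nxtC h (s.toList.getD p ' ')) := by
        simp only [colStepB, hmk]
        rw [if_pos hp]
        have hm1 : (if h && !(s.toList.getD p ' ' == 'W') then
              m.set k (String.ofList (s.toList.take p ++ 'H' :: s.toList.drop (p + 1)))
            else m)
            = m.set k (String.ofList (s.toList.set p (cellC h (s.toList.getD p ' ')))) := by
          cases hh : h
          · rw [if_neg (by simp)]
            have hc : cellC false (s.toList.getD p ' ') = s.toList.getD p ' ' := by
              simp [cellC]
            rw [hc, pvSetSelf s.toList p ' ' hp, hof, ← hmk, pvSetSelf m k "" hk]
          · by_cases hW : s.toList.getD p ' ' = 'W'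
            · have hWb : (s.toList.getD p ' ' == 'W') = true := by rw [hW]; rfl
              rw [if_neg (by rw [hWb]; decide)]
              have hc : cellC true (s.toList.getD p ' ') = s.toList.getD p ' ' := by
                rw [hW]; decide
              rw [hc, pvSetSelf s.toList p ' ' hp, hof, ← hmk, pvSetSelf m k "" hk]
            · have hWb : (s.toList.getD p ' ' == 'W') = false := beq_eq_false_iff_ne.mpr hW
              rw [if_pos (by rw [hWb]; rfl)]
              have hcH : cellC true (s.toList.getD p ' ') = 'H' := by
                unfold cellC
                rw [hWb]
                rfl
              have hset : s.toList.set p 'H'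
                  = s.toList.take p ++ 'H' :: s.toList.drop (p + 1) := by
                rw [List.set_eq_take_append_cons_drop, if_pos hp]
              rw [hcH, hset]
        rw [hm1]
        rfl
      rw [hstep]
      rw [ih (k + 1) _ _ p (by rw [pvSetDropHigh _ _ _ _ (by omega)]; exact hrest)]
      rw [pvSetTake _ _ _ hk, List.map_cons, hcol, List.map_cons, List.append_assoc,
        List.singleton_append]
    · have hcol : colSpecL p h (s.toList :: rest'.map String.toList)
          = s.toList :: colSpecL p h (rest'.map String.toList) := by
        simp only [colSpecL]
        rw [if_neg hp, if_neg hp]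
      have hstep : colStepB p (m, h) k = (m, h) := by
        simp only [colStepB, hmk]
        rw [if_neg hp]
      rw [hstep, ih (k + 1) m h p hrest]
      have htake : m.take (k + 1) = m.take k ++ [s] := by
        rw [List.take_add_one, hmg]
        rfl
      rw [htake, List.map_cons, hcol, List.map_cons, hof, List.append_assoc,
        List.singleton_append]

theorem foldl_colSpecL_congr :
    ∀ (L : List Nat) (G G' : Nat → Bool) (m : List (List Char)),
      (∀ p ∈ L, G p = G' p) →
      L.foldl (fun m p => colSpecL p (G p) m) m = L.foldl (fun m p => colSpecL p (G' p) m) m := by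
  intro L
  induction L with
  | nil => intros; rfl
  | cons p L ih =>
    intro G G' m h
    simp only [List.foldl_cons]
    rw [h p List.mem_cons_self]
    exact ih G G' _ (fun q hq => h q (List.mem_cons_of_mem _ hq))

theorem foldl_colSpecL_nil :
    ∀ (L : List Nat) (G : Nat → Bool),
      L.foldl (fun m p => colSpecL p (G p) m) [] = [] := by
  intro L
  induction L with
  | nil => intro G; rfl
  | cons p L ih => intro G; simp only [List.foldl_cons, colSpecL]; exact ih G

theorem fold_colSpecL_cons :
    ∀ (L : List Nat) (G : Nat → Bool) (r : List Char) (rs : List (List Char)),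
      L.Nodup →
      L.foldl (fun m p => colSpecL p (G p) m) (r :: rs)
        = (L.foldl (fun r' p => if p < r'.length then r'.set p (cellC (G p) (r'.getD p ' ')) else r') r)
          :: L.foldl (fun m p => colSpecL p (nxtRow G r p) m) rs := by
  intro L
  induction L with
  | nil => intros; rfl
  | cons p0 L ih =>
    intro G r rs hnd
    have hp0 : p0 ∉ L := (List.nodup_cons.mp hnd).1
    have hL : L.Nodup := (List.nodup_cons.mp hnd).2
    simp only [List.foldl_cons]
    rw [show colSpecL p0 (G p0) (r :: rs)
        = (if p0 < r.length then r.set p0 (cellC (G p0) (r.getD p0 ' ')) else r)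
          :: colSpecL p0 (if p0 < r.length then nxtC (G p0) (r.getD p0 ' ') else G p0) rs
      from rfl]
    rw [ih G _ _ hL]
    congr 1
    rw [show (if p0 < r.length then nxtC (G p0) (r.getD p0 ' ') else G p0) = nxtRow G r p0
      from rfl]
    apply foldl_colSpecL_congr
    intro q hq
    have hqp : q ≠ p0 := fun e => hp0 (e ▸ hq)
    unfold nxtRow
    by_cases hlt : p0 < r.length
    · rw [if_pos hlt, List.length_set, pvGetDSetNe _ _ _ _ _ (fun e => hqp e.symm)]
    · rw [if_neg hlt]

theorem updRow_aux :
    ∀ (n : Nat) (H : Nat → Bool) (r : List Char),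
      (List.range n).foldl (fun r' p => if p < r'.length then r'.set p (cellC (H p) (r'.getD p ' ')) else r') r
        = r.mapIdx (fun p c => if p < n then cellC (H p) c else c) := by
  intro n
  induction n with
  | zero =>
    intro H r
    simp only [List.range_zero, List.foldl_nil]
    apply List.ext_getElem (by simp [List.length_mapIdx])
    intro i h1 h2
    simp [List.getElem_mapIdx]
  | succ n ih =>
    intro H r
    rw [List.range_succ, List.foldl_append, List.foldl_cons, List.foldl_nil, ih]
    have hlt : (r.mapIdx (fun p c => if p < n then cellC (H p) c else c)).length = r.length :=
      List.length_mapIdx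
    by_cases hn : n < r.length
    · rw [if_pos (by rw [hlt]; exact hn)]
      apply List.ext_getElem (by simp [List.length_set, hlt, List.length_mapIdx])
      intro i h1 h2
      have hgd : (r.mapIdx (fun p c => if p < n then cellC (H p) c else c)).getD n ' '
          = r[n] := by
        rw [pvMapIdxGetD _ _ _ _ hn]
        simp
      by_cases hin : i = n
      · subst hin
        rw [List.getElem_set_self, List.getElem_mapIdx]
        rw [hgd]
        simp
      · rw [List.getElem_set_ne (fun e => hin e.symm), List.getElem_mapIdx,
          List.getElem_mapIdx]
        by_cases hin' : i < n
        · rw [if_pos hin', if_pos (by omega)]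
        · rw [if_neg hin', if_neg (by omega)]
    · rw [if_neg (by rw [hlt]; exact hn)]
      apply List.ext_getElem (by simp [List.length_mapIdx])
      intro i h1 h2
      rw [List.getElem_mapIdx, List.getElem_mapIdx]
      have hi : i < r.length := by simpa [List.length_mapIdx] using h1
      rw [if_pos (by omega), if_pos (by omega)]

theorem specB :
    ∀ (rows : List (List Char)) (H : Nat → Bool), (∀ r ∈ rows, r.length ≤ 10) →
      (List.range 10).foldl (fun m p => colSpecL p (H p) m) rows = spec H rows := by
  intro rows
  induction rows with
  | nil => intro H _; rw [foldl_colSpecL_nil]; rfl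
  | cons r rs ih =>
    intro H hlen
    rw [fold_colSpecL_cons _ _ _ _ List.nodup_range, updRow_aux]
    have hr10 : r.length ≤ 10 := hlen r List.mem_cons_self
    have hhead : r.mapIdx (fun p c => if p < 10 then cellC (H p) c else c)
        = r.mapIdx (fun p c => cellC (H p) c) := by
      apply List.ext_getElem (by simp [List.length_mapIdx])
      intro i h1 h2
      have hi : i < r.length := by simpa [List.length_mapIdx] using h1
      rw [List.getElem_mapIdx, List.getElem_mapIdx, if_pos (by omega)]
    rw [hhead, ih (nxtRow H r) (fun t ht => hlen t (List.mem_cons_of_mem _ ht))]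
    rfl

theorem foldB_strings (pb : List Char) :
    ∀ (L : List Nat) (m : List String),
      L.foldl (colPassB pb) m
        = (L.foldl (fun g p => colSpecL p (seedHold pb p) g) (m.map String.toList)).map
            String.ofList := by
  intro L
  induction L with
  | nil => intro m; rw [List.foldl_nil, List.foldl_nil, pvOfToMap]
  | cons p L ih =>
    intro m
    rw [List.foldl_cons, List.foldl_cons]
    have hcp : colPassB pb m p
        = (colSpecL p (seedHold pb p) (m.map String.toList)).map String.ofList := by
      unfold colPassB
      rw [List.range_eq_range']
      have := colPass_aux m 0 m (seedHold pb p) p (by simp)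
      simpa using this
    rw [hcp, ih, pvToOfMap]

-- ===== VERDICT (by name: the statement is the Claim_ definition above) =====
set_option maxHeartbeats 4000000 in
theorem addHoldsMeasure_spec : Claim_equal_addHoldsMeasure := by
  intro mi notes _hdom hpre
  obtain ⟨hin1, hin2, hne, hall10, hlen10⟩ := hpre
  unfold Spec_addHoldsMeasure
  have e1 : ∃ prevM, PySem.List.pyGet? notes (mi - 1) = some prevM := by
    cases h : PySem.List.pyGet? notes (mi - 1)
    · exact absurd hin1 ((PySem.List.pyGet?_eq_none_iff _ _).mp h)
    · exact ⟨_, rfl⟩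
  obtain ⟨prevM, e1⟩ := e1
  have hne' : prevM ≠ [] := by rw [e1] at hne; simpa using hne
  have e2 : ∃ pb, prevM.getLast? = some pb := by
    cases h : prevM.getLast?
    · exact absurd (List.getLast?_eq_none_iff.mp h) hne'
    · exact ⟨_, rfl⟩
  obtain ⟨pB, e2⟩ := e2
  have e3 : ∃ curM, PySem.List.pyGet? notes mi = some curM := by
    cases h : PySem.List.pyGet? notes mi
    · exact absurd hin2 ((PySem.List.pyGet?_eq_none_iff _ _).mp h)
    · exact ⟨_, rfl⟩
  obtain ⟨curM, e3⟩ := e3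
  have hvals : ∀ s ∈ curM, s.toList.length ≤ 10 := by
    intro s hs
    rw [e3] at hlen10
    simp only [Option.getD_some] at hlen10
    exact of_decide_eq_true (List.all_eq_true.mp hlen10 s hs)
  have hpb : ∀ p, 10 ≤ p → p < pB.toList.length →
      ¬(pB.toList.getD p ' ' = 'M' ∨ pB.toList.getD p ' ' = 'H') := by
    intro p h10 hp
    have hgd : pB.toList.getD p ' ' = pB.toList[p] := pvGetDEq _ _ _ hp
    have hmem : pB.toList.getD p ' ' ∈ pB.toList.drop 10 := by
      have hel : (pB.toList.drop 10)[p - 10]? = some pB.toList[p] := by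
        rw [List.getElem?_drop, show 10 + (p - 10) = p by omega, List.getElem?_eq_getElem hp]
      rw [hgd]
      exact List.mem_of_getElem? hel
    rw [e1] at hall10
    simp only [Option.getD_some] at hall10
    rw [e2] at hall10
    simp only [Option.getD_some] at hall10
    have hb := List.all_eq_true.mp hall10 _ hmem
    intro hcon
    rcases hcon with h | h <;> rw [h] at hb <;> simp at hb
  obtain ⟨hilen, higet⟩ := isholdInit_aux pB.toList hpb pB.toList.length le_rfl
  have hrel : ∀ p, p < 10 →
      (isholdInit pB.toList).getD p 0 = b2i (seedHold pB.toList p) :=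
    fun p hp => higet p hp
  have hA : ((List.range curM.length).foldl measStepA (curM, isholdInit pB.toList)).1
      = (spec (seedHold pB.toList) (curM.map String.toList)).map String.ofList := by
    rw [List.range_eq_range']
    have := measLoopA_aux curM 0 curM (isholdInit pB.toList) (seedHold pB.toList)
      (by simp) hvals hilen hrel
    simpa using this
  have hB : (List.range 10).foldl (colPassB pB.toList) curM
      = (spec (seedHold pB.toList) (curM.map String.toList)).map String.ofList := by
    rw [foldB_strings]
    rw [specB _ _ (by
      intro r hr
      obtain ⟨s, hs, rfl⟩ := List.mem_map.mp hr
      exact hvals s hs)]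
  simp only [addHoldsMeasure, addHoldsMeasure_alt, e1, e3, PySem.List.pyGet?_neg_one, e2]
  rw [hA, hB]
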